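-- pv_equiv track=rewrite | github.com/helmhub-io/charts | tools/match_available_image_tags.py | find_best_matching_tag
-- ===== SOURCE A (Python) =====
-- def find_best_matching_tag(missing_tag, available_tags):
--     """Find the best matching tag from available tags."""
--     # Extract version number from missing tag
--     # Example: "12.1.1-debian-12-r1" -> "12.1.1"
--     missing_version = missing_tag.split('-')[0]
--
--     # Try exact match first
--     if missing_tag in available_tags:
--         return missing_tag
--
--     # Try to find same major.minor version
--     major_minor = '.'.join(missing_version.split('.')[:2])
--
--     # Find tags with same major.minor
--     candidates = []
--     for tag in available_tags:
--         if tag.startswith(major_minor):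
--             candidates.append(tag)
--
--     if candidates:
--         # Return the latest (first in list from Docker Hub)
--         return candidates[0]
--
--     # Try same major version
--     major = missing_version.split('.')[0]
--     for tag in available_tags:
--         if tag.startswith(f"{major}."):
--             return tag
--
--     # Return latest tag if nothing matches
--     if available_tags:
--         return available_tags[0]
--
--     return None
-- ===== SOURCE B (Python) =====
-- def find_best_matching_tag(missing_tag, available_tags):
--     """Find the best matching tag from available tags (single-pass ranked scan)."""
--     missing_version = missing_tag.split('-')[0]
--     parts = missing_version.split('.')
--     major_minor = '.'.join(parts[:2])
--     major_dot = parts[0] + '.'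
--     best, best_rank = None, -1
--     for tag in available_tags:
--         if tag == missing_tag:
--             rank = 3
--         elif tag.startswith(major_minor):
--             rank = 2
--         elif tag.startswith(major_dot):
--             rank = 1
--         else:
--             rank = 0
--         if rank > best_rank:
--             best, best_rank = tag, rank
--     return best
-- ===== Notes on version B (the rewrite author's own statement) =====
-- stated objective: alternative
-- what changed: A's four sequential prioritized scans (exact-match membership test, collect-all major.minor candidates list, early-return major scan, fallback to the first tag) are replaced by a single pass that ranks each tag (3/2/1/0) and keeps the earliest highest-ranked tag.
import Mathlib
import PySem

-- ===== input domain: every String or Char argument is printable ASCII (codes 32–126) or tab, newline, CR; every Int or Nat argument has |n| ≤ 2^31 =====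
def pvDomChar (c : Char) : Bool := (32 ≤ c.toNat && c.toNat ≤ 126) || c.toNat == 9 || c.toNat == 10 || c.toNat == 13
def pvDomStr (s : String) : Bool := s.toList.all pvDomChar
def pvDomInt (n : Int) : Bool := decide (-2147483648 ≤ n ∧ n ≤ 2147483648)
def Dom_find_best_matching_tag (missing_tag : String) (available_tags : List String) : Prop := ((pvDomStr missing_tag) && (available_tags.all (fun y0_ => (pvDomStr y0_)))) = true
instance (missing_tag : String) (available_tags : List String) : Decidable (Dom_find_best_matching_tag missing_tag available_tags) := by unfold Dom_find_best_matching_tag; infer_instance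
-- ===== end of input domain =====

-- B replaces A's four sequential prioritized scans (exact match, major.minor prefix, major prefix, fallback first)
-- by ONE pass maintaining the best-ranked tag so far (objective: alternative decomposition; no mutation involved).

-- ===== PORT A =====
-- s.split(sep)[0]: split? is some for the non-empty literal separators used here, and the
-- resulting list is never empty, so the getD/headD defaults are never used.
def find_best_matching_tag (missing_tag : String) (available_tags : List String) : Option String :=
  let missing_version := ((PySem.Str.split? missing_tag "-").getD []).headD ""
  if available_tags.contains missing_tag then some missing_tag
  else
    let major_minor := PySem.Str.join "."
      (PySem.List.slice ((PySem.Str.split? missing_version ".").getD []) none (some 2))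
    let candidates := available_tags.foldl
      (fun acc tag => if PySem.Str.startswith tag major_minor then acc ++ [tag] else acc) []
    match candidates with
    | c :: _ => some c
    | [] =>
      let major := ((PySem.Str.split? missing_version ".").getD []).headD ""
      -- 'for tag in available_tags: if tag.startswith(major + "."): return tag' = find?
      match available_tags.find? (fun tag => PySem.Str.startswith tag (major ++ ".")) with
      | some t => some t
      | none =>
        match available_tags with
        | t :: _ => some t
        | [] => none

-- ===== PORT B =====
def bRank (mt0 mm md tag : String) : Int :=
  if tag == mt0 then 3
  else if PySem.Str.startswith tag mm then 2
  else if PySem.Str.startswith tag md then 1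
  else 0

def bStep (mt0 mm md : String) (st : Option String × Int) (tag : String) : Option String × Int :=
  if bRank mt0 mm md tag > st.2 then (some tag, bRank mt0 mm md tag) else st

def find_best_matching_tag_alt (missing_tag : String) (available_tags : List String) : Option String :=
  let missing_version := ((PySem.Str.split? missing_tag "-").getD []).headD ""
  let parts := (PySem.Str.split? missing_version ".").getD []
  let major_minor := PySem.Str.join "." (PySem.List.slice parts none (some 2))
  let major_dot := parts.headD "" ++ "."
  (available_tags.foldl (bStep missing_tag major_minor major_dot) (none, -1)).1

-- ===== PRECONDITION & SPEC =====
def Spec_find_best_matching_tag (missing_tag : String) (available_tags : List String) (out : Option String) : Prop := out = find_best_matching_tag_alt missing_tag available_tags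
instance (missing_tag : String) (available_tags : List String) (out : Option String) : Decidable (Spec_find_best_matching_tag missing_tag available_tags out) := by unfold Spec_find_best_matching_tag; infer_instance

-- ===== CLAIM (what is proved, stated in full; the proofs are below) =====
def Claim_equal_find_best_matching_tag : Prop := ∀ (missing_tag : String) (available_tags : List String), Dom_find_best_matching_tag missing_tag available_tags → Spec_find_best_matching_tag missing_tag available_tags (find_best_matching_tag missing_tag available_tags)

-- ===== LEMMAS AND PROOFS =====

theorem bRank_le_three (mt0 mm md tag : String) : bRank mt0 mm md tag ≤ 3 := by
  unfold bRank; split_ifs <;> omega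

theorem bRank_le_two (mt0 mm md tag : String) (h : tag ≠ mt0) : bRank mt0 mm md tag ≤ 2 := by
  unfold bRank
  rw [if_neg (by simpa using h)]
  split_ifs <;> omega

-- once no remaining tag can beat the current rank, the fold is the identity
theorem fold_stable (mt0 mm md : String) (tags : List String) (b : Option String) (r : Int)
    (h : ∀ t ∈ tags, bRank mt0 mm md t ≤ r) :
    tags.foldl (bStep mt0 mm md) (b, r) = (b, r) := by
  induction tags with
  | nil => rfl
  | cons t rest ih =>
    have ht := h t (by simp)
    simp only [List.foldl_cons, bStep, if_neg (by omega : ¬ bRank mt0 mm md t > r)]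
    exact ih (fun u hu => h u (by simp [hu]))

-- rank 3: an exact match anywhere forces the result 'some mt0'
theorem fold_top (mt0 mm md : String) (tags : List String) :
    ∀ (b : Option String) (r : Int), mt0 ∈ tags → r < 3 →
    (tags.foldl (bStep mt0 mm md) (b, r)).1 = some mt0 := by
  induction tags with
  | nil => intro _ _ h; simp at h
  | cons t rest ih =>
    intro b r hmem hr
    by_cases he : t = mt0
    · have hb : bRank mt0 mm md t = 3 := by
        unfold bRank; rw [if_pos (by simpa using he)]
      simp only [List.foldl_cons, bStep, hb, if_pos (by omega : (3:Int) > r)]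
      rw [fold_stable mt0 mm md rest (some t) 3 (fun u _ => bRank_le_three mt0 mm md u)]
      simp [he]
    · have hmem' : mt0 ∈ rest := by
        cases hmem with
        | head => exact absurd rfl he
        | tail _ h => exact h
      simp only [List.foldl_cons, bStep]
      split_ifs with hgt
      · exact ih (some t) _ hmem' (by have := bRank_le_two mt0 mm md t he; omega)
      · exact ih b r hmem' hr

-- rank 2: no exact match, first major.minor-prefixed tag wins
theorem fold_mid2 (mt0 mm md : String) (tags : List String) :
    ∀ (b : Option String) (r : Int) (c : String),
    mt0 ∉ tags → r < 2 →
    tags.find? (fun tag => PySem.Str.startswith tag mm) = some c →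
    (tags.foldl (bStep mt0 mm md) (b, r)).1 = some c := by
  induction tags with
  | nil => intro _ _ _ _ _ h; simp at h
  | cons t rest ih =>
    intro b r c hmem hr hf
    have hne : t ≠ mt0 := fun h => hmem (h ▸ List.mem_cons_self)
    have hmem' : mt0 ∉ rest := fun h => hmem (List.mem_cons_of_mem _ h)
    by_cases hp : PySem.Str.startswith t mm = true
    · have hc : c = t := by
        rw [List.find?_cons_of_pos (p := fun tag => PySem.Str.startswith tag mm) hp] at hf; exact (Option.some.injEq ..).mp hf.symm
      subst hc
      have hrank : bRank mt0 mm md c = 2 := by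
        unfold bRank; rw [if_neg (by simpa using hne), if_pos hp]
      simp only [List.foldl_cons, bStep, hrank, if_pos (by omega : (2:Int) > r)]
      rw [fold_stable mt0 mm md rest (some c) 2
        (fun u hu => bRank_le_two mt0 mm md u (fun h => hmem' (h ▸ hu)))]
    · have hf' : rest.find? (fun tag => PySem.Str.startswith tag mm) = some c := by
        rwa [List.find?_cons_of_neg (p := fun tag => PySem.Str.startswith tag mm) (by simpa using hp)] at hf
      have hrank : bRank mt0 mm md t ≤ 1 := by
        unfold bRank; rw [if_neg (by simpa using hne), if_neg hp]; split_ifs <;> omega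
      simp only [List.foldl_cons, bStep]
      split_ifs with hgt
      · exact ih (some t) _ c hmem' (by omega) hf'
      · exact ih b r c hmem' hr hf'

-- rank 1: no exact match, no major.minor match anywhere, first major-prefixed tag wins
theorem fold_mid1 (mt0 mm md : String) (tags : List String) :
    ∀ (b : Option String) (r : Int) (c : String),
    mt0 ∉ tags → (∀ t ∈ tags, ¬ PySem.Str.startswith t mm = true) → r < 1 →
    tags.find? (fun tag => PySem.Str.startswith tag md) = some c →
    (tags.foldl (bStep mt0 mm md) (b, r)).1 = some c := by
  induction tags with
  | nil => intro _ _ _ _ _ _ h; simp at h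
  | cons t rest ih =>
    intro b r c hmem hp2 hr hf
    have hne : t ≠ mt0 := fun h => hmem (h ▸ List.mem_cons_self)
    have hmem' : mt0 ∉ rest := fun h => hmem (List.mem_cons_of_mem _ h)
    have hp2t : ¬ PySem.Str.startswith t mm = true := hp2 t (by simp)
    have hp2' : ∀ u ∈ rest, ¬ PySem.Str.startswith u mm = true :=
      fun u hu => hp2 u (by simp [hu])
    by_cases hp : PySem.Str.startswith t md = true
    · have hc : c = t := by
        rw [List.find?_cons_of_pos (p := fun tag => PySem.Str.startswith tag md) hp] at hf; exact (Option.some.injEq ..).mp hf.symm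
      subst hc
      have hrank : bRank mt0 mm md c = 1 := by
        unfold bRank
        rw [if_neg (by simpa using hne), if_neg hp2t, if_pos hp]
      simp only [List.foldl_cons, bStep, hrank, if_pos (by omega : (1:Int) > r)]
      rw [fold_stable mt0 mm md rest (some c) 1 ?_]
      intro u hu
      unfold bRank
      rw [if_neg (by simpa using (fun h => hmem' (h ▸ hu) : u ≠ mt0)), if_neg (hp2' u hu)]
      split_ifs <;> omega
    · have hf' : rest.find? (fun tag => PySem.Str.startswith tag md) = some c := by
        rwa [List.find?_cons_of_neg (p := fun tag => PySem.Str.startswith tag md) (by simpa using hp)] at hf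
      have hrank : bRank mt0 mm md t = 0 := by
        unfold bRank; rw [if_neg (by simpa using hne), if_neg hp2t, if_neg hp]
      simp only [List.foldl_cons, bStep]
      split_ifs with hgt
      · exact ih (some t) _ c hmem' hp2' (by omega) hf'
      · exact ih b r c hmem' hp2' hr hf'

-- rank 0: nothing matches anywhere, the first tag wins (or none on the empty list)
theorem fold_low (mt0 mm md : String) (tags : List String)
    (h0 : ∀ t ∈ tags, bRank mt0 mm md t = 0) :
    (tags.foldl (bStep mt0 mm md) (none, -1)).1 = tags.head? := by
  cases tags with
  | nil => rfl
  | cons t rest =>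
    have ht := h0 t (by simp)
    simp only [List.foldl_cons, bStep, ht, if_pos (by omega : (0:Int) > -1)]
    rw [fold_stable mt0 mm md rest (some t) 0
      (fun u hu => le_of_eq (h0 u (by simp [hu])))]
    rfl

-- ===== VERDICT (by name: the statement is the Claim_ definition above) =====
theorem find_best_matching_tag_spec : Claim_equal_find_best_matching_tag := by
  intro mt0 tags _
  unfold Spec_find_best_matching_tag
  simp only [find_best_matching_tag, find_best_matching_tag_alt]
  set mv := ((PySem.Str.split? mt0 "-").getD []).headD "" with hmv
  set parts := (PySem.Str.split? mv ".").getD [] with hparts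
  set mm := PySem.Str.join "." (PySem.List.slice parts none (some 2)) with hmm
  set md := parts.headD "" ++ "." with hmd
  by_cases hin : tags.contains mt0
  · rw [if_pos hin]
    exact (fold_top mt0 mm md tags none (-1) (by simpa using hin) (by omega)).symm
  · rw [if_neg hin]
    have hnot : mt0 ∉ tags := by simpa using hin
    have hcand : tags.foldl
        (fun acc tag => if PySem.Str.startswith tag mm then acc ++ [tag] else acc) [] =
        tags.filter (fun tag => PySem.Str.startswith tag mm) := by
      simpa using PySem.List.foldl_append_if (fun tag => PySem.Str.startswith tag mm) id tags []
    rw [hcand]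
    cases hflt : tags.filter (fun tag => PySem.Str.startswith tag mm) with
    | cons c cs =>
      have hfind : tags.find? (fun tag => PySem.Str.startswith tag mm) = some c := by
        rw [← List.head?_filter, hflt]; rfl
      exact (fold_mid2 mt0 mm md tags none (-1) c hnot (by omega) hfind).symm
    | nil =>
      have hp2 : ∀ t ∈ tags, ¬ PySem.Str.startswith t mm = true :=
        List.filter_eq_nil_iff.mp hflt
      cases hf1 : tags.find? (fun tag => PySem.Str.startswith tag md) with
      | some c =>
        exact (fold_mid1 mt0 mm md tags none (-1) c hnot hp2 (by omega) hf1).symm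
      | none =>
        have hp1 : ∀ t ∈ tags, ¬ PySem.Str.startswith t md = true := by
          intro t ht hc
          exact List.find?_eq_none.mp hf1 t ht hc
        have h0 : ∀ t ∈ tags, bRank mt0 mm md t = 0 := by
          intro t ht
          unfold bRank
          rw [if_neg (by simpa using (fun h => hnot (h ▸ ht) : t ≠ mt0)),
              if_neg (hp2 t ht), if_neg (hp1 t ht)]
        rw [fold_low mt0 mm md tags h0]
        cases tags <;> rfl
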